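-- pv_equiv track=rewrite | github.com/muyr/pyqt_ascii | ascii_str2list.py | word2list
-- ===== SOURCE A (Python) =====
-- def word2list(string):
--     result = []
--     temp = ''
--     for i in string:
--         if i == '#':
--             temp += '1'
--         elif i == ' ':
--             temp += '0'
--         elif i == '\n':
--             result.append(temp)
--             temp = ''
--     return result
-- ===== SOURCE B (Python) =====
-- def word2list(string):
--     return [''.join('1' if c == '#' else '0' for c in line if c in '# ')
--             for line in string.split('\n')[:-1]]
-- ===== Notes on version B (the rewrite author's own statement) =====
-- stated objective: faster
-- what changed: Replaces A's single stateful character-by-character pass with an accumulator by a split-first decomposition: split on newline, drop the trailing segment, and map each line through a filter-and-translate join.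
import Mathlib
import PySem

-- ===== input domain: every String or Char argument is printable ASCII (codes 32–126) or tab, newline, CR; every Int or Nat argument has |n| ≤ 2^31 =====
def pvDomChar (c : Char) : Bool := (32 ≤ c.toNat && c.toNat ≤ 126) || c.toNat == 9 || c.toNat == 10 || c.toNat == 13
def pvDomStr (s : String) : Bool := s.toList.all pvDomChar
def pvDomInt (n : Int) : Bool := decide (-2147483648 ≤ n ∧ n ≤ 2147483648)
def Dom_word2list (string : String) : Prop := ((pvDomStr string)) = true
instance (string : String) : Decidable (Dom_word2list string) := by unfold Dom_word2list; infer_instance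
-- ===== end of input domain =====

-- B replaces A's single stateful accumulator pass by split-on-newline, drop the trailing segment, map each line; measurably faster (C-level split/join instead of per-character concatenation).

-- ===== PORT A =====
def word2listStep (st : List String × List Char) (i : Char) : List String × List Char :=
  if i == '#' then (st.1, st.2 ++ ['1'])
  else if i == ' ' then (st.1, st.2 ++ ['0'])
  else if i == '\n' then (st.1 ++ [String.ofList st.2], [])
  else st

def word2list (string : String) : List String :=
  (string.toList.foldl word2listStep ([], [])).1

-- ===== PORT B =====
-- 'c in "# "' for a single char c is ported as the boolean disjunction c == '#' || c == ' ' (exact).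
def word2list_alt (string : String) : List String :=
  (PySem.List.slice (PySem.Chars.splitOn string.toList ['\n']) none (some (-1))).map
    (fun line => String.ofList (PySem.Chars.join []
      ((line.filter (fun c => c == '#' || c == ' ')).map
        (fun c => if c == '#' then ['1'] else ['0']))))

-- ===== PRECONDITION & SPEC =====
def Spec_word2list (string : String) (out : List String) : Prop := out = word2list_alt string
instance (string : String) (out : List String) : Decidable (Spec_word2list string out) := by unfold Spec_word2list; infer_instance

-- ===== CLAIM (what is proved, stated in full; the proofs are below) =====
def Claim_equal_word2list : Prop := ∀ (string : String), Dom_word2list string → Spec_word2list string (word2list string)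

-- ===== LEMMAS AND PROOFS =====

-- Python split('\n') semantics: the list of '\n'-separated segments (always nonempty).
def pvSegs : List Char → List (List Char)
  | [] => [[]]
  | c :: cs => if c = '\n' then [] :: pvSegs cs
               else (c :: (pvSegs cs).headI) :: (pvSegs cs).tail

lemma pvSegs_cons_headI_tail (cs : List Char) : pvSegs cs = (pvSegs cs).headI :: (pvSegs cs).tail := by
  cases cs with
  | nil => simp [pvSegs]
  | cons c cs => by_cases h : c = '\n' <;> simp [pvSegs, h]

lemma splitOn_go_eq (fuel : Nat) : ∀ (l cur : List Char) (accs : List (List Char)),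
    l.length ≤ fuel →
    PySem.Chars.splitOn.go ['\n'] fuel l cur accs = accs.reverse ++ ((cur.reverse ++ (pvSegs l).headI) :: (pvSegs l).tail) := by
  induction fuel with
  | zero =>
    intro l cur accs h
    have : l = [] := by cases l <;> simp_all
    subst this
    simp [PySem.Chars.splitOn.go, pvSegs]
  | succ fuel ih =>
    intro l cur accs h
    cases l with
    | nil => simp [PySem.Chars.splitOn.go, pvSegs]
    | cons c rest =>
      simp only [PySem.Chars.splitOn.go]
      by_cases hc : c = '\n'
      · subst hc
        rw [if_pos (by simp [List.isPrefixOf])]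
        simp only [List.length_cons] at h
        rw [show List.drop (['\n'] : List Char).length ('\n' :: rest) = rest from rfl,
            ih rest [] (cur.reverse :: accs) (by simpa using Nat.le_of_succ_le_succ h)]
        rw [show pvSegs ('\n' :: rest) = [] :: pvSegs rest from by simp [pvSegs]]
        simp only [List.headI_cons, List.tail_cons, List.reverse_cons, List.reverse_nil,
          List.nil_append, List.append_nil, List.append_assoc, List.singleton_append]
        rw [← pvSegs_cons_headI_tail rest]
      · rw [if_neg (by simp [List.isPrefixOf_iff_prefix, List.cons_prefix_cons]; exact fun h => hc h.symm)]
        simp only [List.length_cons] at h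
        rw [ih rest (c :: cur) accs (Nat.le_of_succ_le_succ h)]
        rw [show pvSegs (c :: rest) = (c :: (pvSegs rest).headI) :: (pvSegs rest).tail from by simp [pvSegs, hc]]
        simp

lemma splitOn_eq (cs : List Char) : PySem.Chars.splitOn cs ['\n'] = pvSegs cs := by
  rw [PySem.Chars.splitOn, splitOn_go_eq (cs.length + 1) cs [] [] (by omega)]
  simpa using (pvSegs_cons_headI_tail cs).symm

-- the translated row of one segment
def pvTrans (l : List Char) : List Char :=
  (l.filter (fun c => c == '#' || c == ' ')).map (fun c => if c == '#' then '1' else '0')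

-- A's remaining output given the pending accumulator temp
def pvRowsFrom (temp : List Char) : List Char → List String
  | [] => []
  | c :: cs =>
    if c = '#' then pvRowsFrom (temp ++ ['1']) cs
    else if c = ' ' then pvRowsFrom (temp ++ ['0']) cs
    else if c = '\n' then String.ofList temp :: pvRowsFrom [] cs
    else pvRowsFrom temp cs

def pvPrefixHead (temp : List Char) : List (List Char) → List (List Char)
  | [] => []
  | l :: ls => (temp ++ l) :: ls

lemma A_foldl_eq (cs : List Char) : ∀ (acc : List String) (temp : List Char),
    (cs.foldl word2listStep (acc, temp)).1 = acc ++ pvRowsFrom temp cs := by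
  induction cs with
  | nil => intro acc temp; simp [pvRowsFrom]
  | cons c cs ih =>
    intro acc temp
    simp only [List.foldl_cons]
    by_cases h1 : c = '#'
    · subst h1
      rw [show word2listStep (acc, temp) '#' = (acc, temp ++ ['1']) from by simp [word2listStep]]
      rw [ih, pvRowsFrom]
      simp
    · by_cases h2 : c = ' '
      · subst h2
        rw [show word2listStep (acc, temp) ' ' = (acc, temp ++ ['0']) from by simp [word2listStep]]
        rw [ih, pvRowsFrom]
        simp [h1]
      · by_cases h3 : c = '\n'
        · subst h3
          rw [show word2listStep (acc, temp) '\n' = (acc ++ [String.ofList temp], []) from by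
            simp [word2listStep]]
          rw [ih, pvRowsFrom]
          simp
        · rw [show word2listStep (acc, temp) c = (acc, temp) from by simp [word2listStep, h1, h2, h3]]
          rw [ih, pvRowsFrom]
          simp [h1, h2, h3]

lemma prefixHead_nil (xs : List (List Char)) : pvPrefixHead [] xs = xs := by
  cases xs <;> simp [pvPrefixHead]

lemma rowsFrom_eq (cs : List Char) : ∀ (temp : List Char),
    pvRowsFrom temp cs = (pvPrefixHead temp ((pvSegs cs).dropLast.map pvTrans)).map String.ofList := by
  induction cs with
  | nil => intro temp; simp [pvRowsFrom, pvSegs, pvPrefixHead]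
  | cons c cs ih =>
    intro temp
    rcases hseg : pvSegs cs with _ | ⟨h0, t⟩
    · exact absurd hseg (by rw [pvSegs_cons_headI_tail cs]; simp)
    · by_cases h3 : c = '\n'
      · subst h3
        rw [show pvRowsFrom temp ('\n' :: cs) = String.ofList temp :: pvRowsFrom [] cs from by
          simp [pvRowsFrom]]
        rw [ih []]
        rw [show pvSegs ('\n' :: cs) = [] :: h0 :: t from by simp [pvSegs, hseg], hseg]
        cases t with
        | nil => simp [pvPrefixHead, pvTrans]
        | cons t0 ts => simp [pvPrefixHead, pvTrans]
      · by_cases h1 : c = '#'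
        · subst h1
          rw [show pvRowsFrom temp ('#' :: cs) = pvRowsFrom (temp ++ ['1']) cs from by
            simp [pvRowsFrom]]
          rw [ih (temp ++ ['1'])]
          rw [show pvSegs ('#' :: cs) = ('#' :: h0) :: t from by simp [pvSegs, hseg], hseg]
          cases t with
          | nil => simp [pvPrefixHead]
          | cons t0 ts =>
            simp [pvPrefixHead, pvTrans]
        · by_cases h2 : c = ' '
          · subst h2
            rw [show pvRowsFrom temp (' ' :: cs) = pvRowsFrom (temp ++ ['0']) cs from by
              simp [pvRowsFrom]]
            rw [ih (temp ++ ['0'])]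
            rw [show pvSegs (' ' :: cs) = (' ' :: h0) :: t from by simp [pvSegs, hseg], hseg]
            cases t with
            | nil => simp [pvPrefixHead]
            | cons t0 ts =>
              simp [pvPrefixHead, pvTrans]
          · rw [show pvRowsFrom temp (c :: cs) = pvRowsFrom temp cs from by
              simp [pvRowsFrom, h1, h2, h3]]
            rw [ih temp]
            rw [show pvSegs (c :: cs) = (c :: h0) :: t from by simp [pvSegs, h3, hseg], hseg]
            cases t with
            | nil => simp [pvPrefixHead]
            | cons t0 ts =>
              simp [pvPrefixHead, pvTrans, h1, h2]

lemma join_singleton_map (ls : List Char) :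
    PySem.Chars.join [] (ls.map (fun c => if c = '#' then ['1'] else ['0']))
      = ls.map (fun c => if c = '#' then '1' else '0') := by
  have h1 : (fun c : Char => if c = '#' then ['1'] else ['0'])
      = (fun c : Char => [(if c = '#' then '1' else '0')]) := by
    funext c; by_cases h : c = '#' <;> simp [h]
  have h2 : ls.map (fun c : Char => [(if c = '#' then '1' else '0')])
      = (ls.map (fun c => if c = '#' then '1' else '0')).map (fun c => [c]) := by
    rw [List.map_map]; rfl
  rw [h1, h2]
  exact PySem.Chars.join_nil_singletons _

-- ===== VERDICT (by name: the statement is the Claim_ definition above) =====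
theorem word2list_spec : Claim_equal_word2list := by
  intro string _
  show word2list string = word2list_alt string
  unfold word2list word2list_alt
  rw [PySem.List.slice_to_neg_one, splitOn_eq, A_foldl_eq, rowsFrom_eq, prefixHead_nil]
  simp [List.map_map, join_singleton_map]
  have hfun : (String.ofList ∘ pvTrans)
      = (fun line => String.ofList (List.map (fun c => if c = '#' then '1' else '0')
          (List.filter (fun c => c == '#' || c == ' ') line))) := by
    funext line; simp [pvTrans, Function.comp]
  rw [hfun]
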